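-- pv_equiv track=rewrite | github.com/c4h-mg0/pdf_extractor | src/pipeline/helpers.py | deduplicar
-- ===== SOURCE A (Python) =====
-- def deduplicar(registros, tipo="consulta"):
--     chaves = {}
--     campo_ref = "especialidade" if tipo == "consulta" else "exame"
--
--     for r in registros:
--         codigo = r.get("codigo") or ""
--         nome = r.get("nome") or ""
--         campo = r.get(campo_ref) or ""
--         ts = r.get("arquivo_created_utc", "")
--
--         keys = [
--             f"{codigo}|{campo}" if codigo else None,
--             f"{nome}|{campo}" if nome else None
--         ]
--
--         for k in keys:
--             if not k:
--                 continue
--             atual = chaves.get(k)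
--             if not atual or ts > atual.get("arquivo_created_utc", ""):  # comparação direta
--                 chaves[k] = r
--
--     return list({id(v): v for v in chaves.values()}.values())
-- ===== SOURCE B (Python) =====
-- def deduplicar(registros, tipo="consulta"):
--     campo_ref = "especialidade" if tipo == "consulta" else "exame"
--     grupos = {}
--     for r in registros:
--         codigo = r.get("codigo") or ""
--         nome = r.get("nome") or ""
--         campo = r.get(campo_ref) or ""
--         chaves_r = ([f"{codigo}|{campo}"] if codigo else []) + ([f"{nome}|{campo}"] if nome else [])
--         for k in chaves_r:
--             grupos.setdefault(k, []).append(r)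
--     vencedores = [max(g, key=lambda x: x.get("arquivo_created_utc", "")) for g in grupos.values()]
--     return list({id(v): v for v in vencedores}.values())
-- ===== Notes on version B (the rewrite author's own statement) =====
-- stated objective: alternative
-- what changed: A maintains a key->current-winner dict updated online with a strict timestamp comparison; B first groups all records per key (key->list, setdefault/append) and then reduces each group with max(key=timestamp), whose first-maximal tie-break reproduces A's strict '>' update.
import Mathlib
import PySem

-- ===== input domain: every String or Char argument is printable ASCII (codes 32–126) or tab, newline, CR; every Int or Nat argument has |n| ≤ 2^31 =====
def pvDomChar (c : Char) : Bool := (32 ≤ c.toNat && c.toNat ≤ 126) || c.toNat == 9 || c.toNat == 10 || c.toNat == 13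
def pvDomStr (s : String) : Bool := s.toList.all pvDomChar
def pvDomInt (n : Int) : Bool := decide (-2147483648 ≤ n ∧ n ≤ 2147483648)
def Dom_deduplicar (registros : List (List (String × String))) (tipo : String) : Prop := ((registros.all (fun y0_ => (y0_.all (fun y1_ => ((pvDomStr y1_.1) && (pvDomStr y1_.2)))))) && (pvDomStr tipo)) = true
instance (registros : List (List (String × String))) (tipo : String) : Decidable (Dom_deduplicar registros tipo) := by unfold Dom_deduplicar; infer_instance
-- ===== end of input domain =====

-- B replaces A's online strict-max dict update with a two-pass group-then-reduce (key → all records, then max per group); alternative decomposition, same cost.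

-- r.get(k) or dflt / r.get(k, dflt) on a record dict (first-match association-list lookup; '' is falsy so both coincide here)
def pvRecGetD (r : List (String × String)) (k d : String) : String :=
  match r.find? (fun p => p.1 == k) with
  | some p => p.2
  | none => d

-- list({id(v): v for v in vs}.values()) — identity-keyed dedup; modelled by VALUE: exact here because
-- two distinct record objects of equal content share the same keys and timestamp, so at most one of
-- them ever survives into the deduplicated values (verified against CPython by differential testing).
def pyIdDedup (vs : List (List (String × String))) : List (List (String × String)) :=
  (PySem.Dict.ofList (vs.map (fun v => (v, v)))).values

-- ===== PORT A =====
def pvStepA (campoRef : String) (ch : PySem.Dict String (List (String × String))) (r : List (String × String)) : PySem.Dict String (List (String × String)) :=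
  let codigo := pvRecGetD r "codigo" ""
  let nome := pvRecGetD r "nome" ""
  let campo := pvRecGetD r campoRef ""
  let ts := pvRecGetD r "arquivo_created_utc" ""
  let keys : List (Option String) :=
    [if codigo ≠ "" then some (codigo ++ "|" ++ campo) else none,
     if nome ≠ "" then some (nome ++ "|" ++ campo) else none]
  keys.foldl (fun ch k? =>
    match k? with
    | none => ch
    | some k =>
      match ch.get? k with
      | none => ch.insert k r
      | some atual =>
        if atual = [] ∨ pvRecGetD atual "arquivo_created_utc" "" < ts then ch.insert k r else ch) ch

def deduplicar (registros : List (List (String × String))) (tipo : String) : List (List (String × String)) :=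
  let campoRef := if tipo = "consulta" then "especialidade" else "exame"
  let chaves := registros.foldl (pvStepA campoRef) PySem.Dict.empty
  pyIdDedup chaves.values

-- ===== PORT B =====
-- max(g, key=lambda x: x.get("arquivo_created_utc", "")) — first maximal element; [] is the (unreachable) empty-group fallback
def pvW (g : List (List (String × String))) : List (String × String) :=
  match PySem.List.max? g (fun x => pvRecGetD x "arquivo_created_utc" "") with
  | some m => m
  | none => []

def pvStepB (campoRef : String) (g : PySem.Dict String (List (List (String × String)))) (r : List (String × String)) : PySem.Dict String (List (List (String × String))) :=
  let codigo := pvRecGetD r "codigo" ""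
  let nome := pvRecGetD r "nome" ""
  let campo := pvRecGetD r campoRef ""
  let chavesR := (if codigo ≠ "" then [codigo ++ "|" ++ campo] else []) ++
                 (if nome ≠ "" then [nome ++ "|" ++ campo] else [])
  chavesR.foldl (fun g k => g.modify k [] (fun l => l ++ [r])) g

def deduplicar_alt (registros : List (List (String × String))) (tipo : String) : List (List (String × String)) :=
  let campoRef := if tipo = "consulta" then "especialidade" else "exame"
  let grupos := registros.foldl (pvStepB campoRef) PySem.Dict.empty
  let vencedores := grupos.values.map pvW
  pyIdDedup vencedores

-- ===== PRECONDITION & SPEC =====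
def Spec_deduplicar (registros : List (List (String × String))) (tipo : String) (out : List (List (String × String))) : Prop := out = deduplicar_alt registros tipo
instance (registros : List (List (String × String))) (tipo : String) (out : List (List (String × String))) : Decidable (Spec_deduplicar registros tipo out) := by unfold Spec_deduplicar; infer_instance

-- ===== CLAIM (what is proved, stated in full; the proofs are below) =====
def Claim_equal_deduplicar : Prop := ∀ (registros : List (List (String × String))) (tipo : String), Dom_deduplicar registros tipo → Spec_deduplicar registros tipo (deduplicar registros tipo)

-- ===== LEMMAS AND PROOFS =====

-- chaves (A's dict) is groups (B's dict) with each group replaced by its winner, entry for entry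
def pvMapW (g : PySem.Dict String (List (List (String × String)))) : PySem.Dict String (List (String × String)) :=
  PySem.Dict.mk (g.items.map (fun p => (p.1, pvW p.2)))

-- invariant carried by B's groups dict: keys are unique, every group and every grouped record is nonempty
def pvInvG (g : PySem.Dict String (List (List (String × String)))) : Prop :=
  g.keys.Nodup ∧ ∀ p ∈ g.items, p.2 ≠ [] ∧ ∀ x ∈ p.2, x ≠ []

theorem pvRecGetD_nil (k d : String) : pvRecGetD [] k d = d := rfl

theorem contains_pvMapW (g : PySem.Dict String (List (List (String × String)))) (k : String) :
    (pvMapW g).contains k = g.contains k := by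
  simp only [pvMapW, PySem.Dict.contains, List.any_map]
  exact List.any_congr rfl (fun a => rfl)

theorem get?_pvMapW (g : PySem.Dict String (List (List (String × String)))) (k : String) :
    (pvMapW g).get? k = (g.get? k).map pvW := by
  simp only [pvMapW, PySem.Dict.get?, List.find?_map]
  cases h : g.items.find? (fun p => p.1 == k) with
  | none =>
    have : g.items.find? ((fun p => p.1 == k) ∘ fun p => ((p.1, pvW p.2) : String × List (String × String))) = none := by
      simpa [Function.comp] using h
    simp [this]
  | some p =>
    have : g.items.find? ((fun p => p.1 == k) ∘ fun p => ((p.1, pvW p.2) : String × List (String × String))) = some p := by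
      simpa [Function.comp] using h
    simp [this]

theorem keys_pvMapW (g : PySem.Dict String (List (List (String × String)))) :
    (pvMapW g).keys = g.keys := by
  simp [pvMapW, PySem.Dict.keys]

theorem pvMapW_insert (g : PySem.Dict String (List (List (String × String)))) (k : String) (v : List (List (String × String))) :
    pvMapW (g.insert k v) = (pvMapW g).insert k (pvW v) := by
  by_cases hc : g.contains k = true
  · have hc' : (pvMapW g).contains k = true := by rw [contains_pvMapW]; exact hc
    apply PySem.Dict.ext
    rw [PySem.Dict.items_insert_of_contains _ _ hc']
    simp only [pvMapW, PySem.Dict.insert, hc, if_true, List.map_map]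
    apply List.map_congr_left
    intro p _
    by_cases hk : p.1 = k <;> simp [hk]
  · have hc' : (pvMapW g).contains k = false := by rw [contains_pvMapW]; simpa using hc
    apply PySem.Dict.ext
    rw [PySem.Dict.items_insert_of_not_contains _ _ hc']
    simp only [pvMapW, PySem.Dict.insert, hc, if_false, Bool.false_eq_true, List.map_append, List.map_cons, List.map_nil]

theorem insert_self_eq (d : PySem.Dict String (List (String × String))) (k : String) (v : List (String × String))
    (hnd : d.keys.Nodup) (h : d.get? k = some v) : d.insert k v = d := by
  apply PySem.Dict.ext
  have hc : d.contains k = true := by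
    rw [PySem.Dict.contains_eq_isSome_get?, h]; rfl
  rw [PySem.Dict.items_insert_of_contains _ _ hc]
  conv_rhs => rw [← List.map_id d.items]
  apply List.map_congr_left
  intro p hp
  by_cases hk : p.1 == k
  · have hpk : p.1 = k := by simpa using hk
    have h2 : d.get? p.1 = some p.2 := by
      cases p
      exact PySem.Dict.get?_of_mem_items _ hp hnd
    rw [hpk, h] at h2
    have h3 : p.2 = v := by simpa using h2.symm
    simp [← hpk, ← h3]
  · simp [hk]

theorem pvW_append (l : List (List (String × String))) (r : List (String × String)) (hl : l ≠ []) :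
    pvW (l ++ [r]) =
      if pvRecGetD (pvW l) "arquivo_created_utc" "" < pvRecGetD r "arquivo_created_utc" "" then r else pvW l := by
  cases h : PySem.List.max? l (fun x => pvRecGetD x "arquivo_created_utc" "") with
  | none => exact absurd ((PySem.List.max?_eq_none_iff l _).mp h) hl
  | some m =>
    have hm : pvW l = m := by simp [pvW, h]
    have happ : PySem.List.max? (l ++ [r]) (fun x => pvRecGetD x "arquivo_created_utc" "") =
        if pvRecGetD m "arquivo_created_utc" "" < pvRecGetD r "arquivo_created_utc" "" then some r else some m := by
      unfold PySem.List.max? at h ⊢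
      rw [List.foldl_append, h]
      simp only [List.foldl_cons, List.foldl_nil]
    rw [hm]
    by_cases hlt : pvRecGetD m "arquivo_created_utc" "" < pvRecGetD r "arquivo_created_utc" ""
    · simp [pvW, happ, hlt]
    · simp [pvW, happ, hlt]

theorem key_step (g : PySem.Dict String (List (List (String × String)))) (k : String) (r : List (String × String))
    (hinv : pvInvG g) :
    (match (pvMapW g).get? k with
     | none => (pvMapW g).insert k r
     | some atual =>
       if atual = [] ∨ pvRecGetD atual "arquivo_created_utc" "" < pvRecGetD r "arquivo_created_utc" "" then
         (pvMapW g).insert k r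
       else (pvMapW g)) = pvMapW (g.modify k [] (fun l => l ++ [r])) := by
  rw [PySem.Dict.modify]
  cases h : g.get? k with
  | none =>
    have h1 : (pvMapW g).get? k = none := by rw [get?_pvMapW, h]; rfl
    have h2 : g.getD k [] = [] := PySem.Dict.getD_of_get?_eq_none g [] h
    rw [h2]
    simp only [h1, List.nil_append, pvMapW_insert]
    rfl
  | some l =>
    have hmem : (k, l) ∈ g.items := (PySem.Dict.get?_eq_some_iff_mem_items g k l hinv.1).mp h
    obtain ⟨hlne, hmemne⟩ := hinv.2 (k, l) hmem
    have h1 : (pvMapW g).get? k = some (pvW l) := by rw [get?_pvMapW, h]; rfl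
    have h2 : g.getD k [] = l := PySem.Dict.getD_of_get?_eq_some g [] h
    have hwin : pvW l ∈ l := by
      cases hmax : PySem.List.max? l (fun x => pvRecGetD x "arquivo_created_utc" "") with
      | none => exact absurd ((PySem.List.max?_eq_none_iff l _).mp hmax) hlne
      | some m => rw [show pvW l = m by simp [pvW, hmax]]; exact PySem.List.max?_mem hmax
    have hwne : pvW l ≠ [] := hmemne _ hwin
    rw [h2]
    simp only [h1]
    rw [pvMapW_insert, pvW_append l r hlne]
    by_cases hlt : pvRecGetD (pvW l) "arquivo_created_utc" "" < pvRecGetD r "arquivo_created_utc" ""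
    · simp [hlt]
    · simp only [hlt, if_false, or_false]
      rw [if_neg hwne]
      exact (insert_self_eq (pvMapW g) k (pvW l) (by rw [keys_pvMapW]; exact hinv.1) h1).symm

theorem inv_step (g : PySem.Dict String (List (List (String × String)))) (k : String) (r : List (String × String))
    (hinv : pvInvG g) (hr : r ≠ []) : pvInvG (g.modify k [] (fun l => l ++ [r])) := by
  rw [PySem.Dict.modify]
  constructor
  · exact PySem.Dict.nodup_keys_insert g k _ hinv.1
  · intro p hp
    rw [PySem.Dict.mem_items_insert] at hp
    rcases hp with hp | ⟨hp, _⟩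
    · subst hp
      refine ⟨by simp, ?_⟩
      intro x hx
      rw [List.mem_append] at hx
      rcases hx with hx | hx
      · cases h : g.get? k with
        | none => rw [PySem.Dict.getD_of_get?_eq_none g [] h] at hx; simp at hx
        | some l =>
          rw [PySem.Dict.getD_of_get?_eq_some g [] h] at hx
          exact (hinv.2 (k, l) ((PySem.Dict.get?_eq_some_iff_mem_items g k l hinv.1).mp h)).2 x hx
      · simp at hx; subst hx; exact hr
    · exact hinv.2 p hp

theorem rec_step (campoRef : String) (g : PySem.Dict String (List (List (String × String)))) (r : List (String × String))
    (hinv : pvInvG g) :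
    pvStepA campoRef (pvMapW g) r = pvMapW (pvStepB campoRef g r) ∧ pvInvG (pvStepB campoRef g r) := by
  have hrne : pvRecGetD r "codigo" "" ≠ "" → r ≠ [] := by
    intro h he; subst he; exact h (pvRecGetD_nil _ _)
  have hrne' : pvRecGetD r "nome" "" ≠ "" → r ≠ [] := by
    intro h he; subst he; exact h (pvRecGetD_nil _ _)
  unfold pvStepA pvStepB
  by_cases hc : pvRecGetD r "codigo" "" ≠ "" <;> by_cases hn : pvRecGetD r "nome" "" ≠ "" <;>
    simp only [hc, hn, ite_not, if_false, List.nil_append, List.append_nil,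
      List.cons_append, List.foldl_cons, List.foldl_nil]
  · -- both keys
    have hr := hrne hc
    have i1 := inv_step g (pvRecGetD r "codigo" "" ++ "|" ++ pvRecGetD r campoRef "") r hinv hr
    refine ⟨?_, inv_step _ _ r i1 hr⟩
    rw [key_step g _ r hinv, key_step _ _ r i1]
  · -- codigo only
    have hr := hrne hc
    exact ⟨key_step g _ r hinv, inv_step g _ r hinv hr⟩
  · -- nome only
    have hr := hrne' hn
    exact ⟨key_step g _ r hinv, inv_step g _ r hinv hr⟩
  · -- neither
    exact ⟨trivial, hinv⟩

theorem main_fold (l : List (List (String × String))) (campoRef : String)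
    (g : PySem.Dict String (List (List (String × String)))) (hinv : pvInvG g) :
    l.foldl (pvStepA campoRef) (pvMapW g) = pvMapW (l.foldl (pvStepB campoRef) g) := by
  induction l generalizing g with
  | nil => rfl
  | cons r t ih =>
    have h := rec_step campoRef g r hinv
    simp only [List.foldl_cons, h.1, ih _ h.2]

theorem values_pvMapW (g : PySem.Dict String (List (List (String × String)))) :
    (pvMapW g).values = g.values.map pvW := by
  simp [pvMapW, PySem.Dict.values]

-- ===== VERDICT (by name: the statement is the Claim_ definition above) =====
theorem deduplicar_spec : Claim_equal_deduplicar := by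
  intro registros tipo _
  unfold Spec_deduplicar deduplicar deduplicar_alt
  have h0 : pvInvG PySem.Dict.empty := ⟨List.nodup_nil, by intro p hp; simp [PySem.Dict.empty] at hp⟩
  have h : registros.foldl (pvStepA (if tipo = "consulta" then "especialidade" else "exame")) PySem.Dict.empty
      = pvMapW (registros.foldl (pvStepB (if tipo = "consulta" then "especialidade" else "exame")) PySem.Dict.empty) := by
    have := main_fold registros (if tipo = "consulta" then "especialidade" else "exame") PySem.Dict.empty h0
    simpa [pvMapW, PySem.Dict.empty] using this
  simp only [h, values_pvMapW]
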